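-- pv_equiv track=rewrite | github.com/iKK-001/research-plan-coach-skill | scripts/extract_source_notes.py | find_likely_sections
-- ===== SOURCE A (Python) =====
-- SECTION_PATTERNS = [
--     "abstract",
--     "introduction",
--     "literature review",
--     "theoretical background",
--     "hypothesis",
--     "method",
--     "methodology",
--     "results",
--     "discussion",
--     "limitations",
--     "future research",
--     "conclusion",
--     "references",
--     "摘要",
--     "引言",
--     "文献综述",
--     "研究方法",
--     "研究结果",
--     "讨论",
--     "局限",
--     "未来研究",
--     "结论",
--     "要旨",
--     "はじめに",
--     "先行研究",
--     "仮説",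
--     "方法",
--     "結果",
--     "考察",
--     "限界",
--     "今後",
--     "結論",
-- ]
--
-- def find_likely_sections(text: str, keywords: list[str]) -> list[str]:
--     patterns = [pattern.lower() for pattern in SECTION_PATTERNS + keywords]
--     lines = [line.strip() for line in text.splitlines() if line.strip()]
--     hits: list[str] = []
--     for line in lines:
--         normalized = line.lower()
--         if len(line) <= 180 and any(pattern in normalized for pattern in patterns):
--             hits.append(line)
--     return hits[:100]
-- ===== SOURCE B (Python) =====
-- SECTION_PATTERNS = [
--     "abstract",
--     "introduction",
--     "literature review",
--     "theoretical background",
--     "hypothesis",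
--     "method",
--     "methodology",
--     "results",
--     "discussion",
--     "limitations",
--     "future research",
--     "conclusion",
--     "references",
--     "摘要",
--     "引言",
--     "文献综述",
--     "研究方法",
--     "研究结果",
--     "讨论",
--     "局限",
--     "未来研究",
--     "结论",
--     "要旨",
--     "はじめに",
--     "先行研究",
--     "仮説",
--     "方法",
--     "結果",
--     "考察",
--     "限界",
--     "今後",
--     "結論",
-- ]
--
-- def find_likely_sections(text: str, keywords: list[str]) -> list[str]:
--     # Pattern-major strategy: one pass over the text PER PATTERN marking the indices of the
--     # candidate lines that contain it in a set, then emit the marked lines in text order.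
--     patterns = [pattern.lower() for pattern in SECTION_PATTERNS + keywords]
--     lines = [line.strip() for line in text.splitlines() if line.strip()]
--     cand = [(i, line) for i, line in enumerate(lines) if len(line) <= 180]
--     lows = [(i, line.lower()) for i, line in cand]
--     matched: set[int] = set()
--     for pattern in patterns:
--         for i, low in lows:
--             if pattern in low:
--                 matched.add(i)
--     return [line for i, line in cand if i in matched][:100]
-- ===== Notes on version B (the rewrite author's own statement) =====
-- stated objective: alternative
-- what changed: Inverts A's loop nesting: instead of testing every pattern inside a per-line loop, B makes one pass over the candidate lines per pattern, marking matching line indices in a set, and then emits the marked lines in text order (the index set restores the order A gets for free).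
import Mathlib
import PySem

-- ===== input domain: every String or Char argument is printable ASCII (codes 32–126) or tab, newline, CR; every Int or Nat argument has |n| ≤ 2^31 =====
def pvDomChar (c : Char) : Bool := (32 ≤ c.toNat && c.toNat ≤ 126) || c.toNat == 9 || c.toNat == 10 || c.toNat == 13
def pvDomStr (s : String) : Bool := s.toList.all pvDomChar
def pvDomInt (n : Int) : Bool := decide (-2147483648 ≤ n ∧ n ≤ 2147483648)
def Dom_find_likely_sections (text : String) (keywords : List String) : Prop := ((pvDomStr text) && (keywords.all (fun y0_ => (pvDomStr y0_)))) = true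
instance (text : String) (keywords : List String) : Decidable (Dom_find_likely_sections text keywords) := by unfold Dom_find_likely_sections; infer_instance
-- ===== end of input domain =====

-- B inverts A's loop nesting: one marking pass over the candidate lines per pattern into a set
-- of matching line indices, then the marked lines are emitted in text order (alternative).

def pvSectionPatterns : List String := ["abstract", "introduction", "literature review", "theoretical background", "hypothesis", "method", "methodology", "results", "discussion", "limitations", "future research", "conclusion", "references", "摘要", "引言", "文献综述", "研究方法", "研究结果", "讨论", "局限", "未来研究", "结论", "要旨", "はじめに", "先行研究", "仮説", "方法", "結果", "考察", "限界", "今後", "結論"]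

-- ===== PORT A =====
def find_likely_sections (text : String) (keywords : List String) : List String :=
  let patterns := (pvSectionPatterns ++ keywords).map PySem.Str.lower
  let lines := (PySem.Str.splitlines text).filterMap
    (fun line => if PySem.Str.strip line ≠ "" then some (PySem.Str.strip line) else none)
  let hits := lines.foldl (fun hits line =>
    -- normalized = line.lower()
    if PySem.Str.len line ≤ 180 ∧ (patterns.any (fun p => PySem.Str.isIn p (PySem.Str.lower line))) = true
    then hits ++ [line] else hits) []
  hits.take 100

-- ===== PORT B =====
-- inner loop of Source B: 'for i, low in lows: if pattern in low: matched.add(i)'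
def pvMarkPass (lows : List (Int × String)) (pattern : String) (matched : PySem.Set Int) : PySem.Set Int :=
  lows.foldl (fun m il => if PySem.Str.isIn pattern il.2 then PySem.Set.add m il.1 else m) matched

def find_likely_sections_alt (text : String) (keywords : List String) : List String :=
  let patterns := (pvSectionPatterns ++ keywords).map PySem.Str.lower
  let lines := (PySem.Str.splitlines text).filterMap
    (fun line => if PySem.Str.strip line ≠ "" then some (PySem.Str.strip line) else none)
  let cand := (PySem.List.enumerate lines).filter (fun il => PySem.Str.len il.2 ≤ 180)
  let lows := cand.map (fun il => (il.1, PySem.Str.lower il.2))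
  let matched := patterns.foldl (fun m p => pvMarkPass lows p m) PySem.Set.empty
  ((cand.filter (fun il => PySem.Set.contains matched il.1)).map (fun il => il.2)).take 100

-- ===== PRECONDITION & SPEC =====
def Spec_find_likely_sections (text : String) (keywords : List String) (out : List String) : Prop := out = find_likely_sections_alt text keywords
instance (text : String) (keywords : List String) (out : List String) : Decidable (Spec_find_likely_sections text keywords out) := by unfold Spec_find_likely_sections; infer_instance

-- ===== CLAIM (what is proved, stated in full; the proofs are below) =====
def Claim_equal_find_likely_sections : Prop := ∀ (text : String) (keywords : List String), Dom_find_likely_sections text keywords → Spec_find_likely_sections text keywords (find_likely_sections text keywords)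

-- ===== LEMMAS AND PROOFS =====

-- membership after one marking pass
theorem pv_mem_markPass (lows : List (Int × String)) (p : String) (m : PySem.Set Int) (x : Int) :
    x ∈ lows.foldl (fun m il => if PySem.Str.isIn p il.2 then PySem.Set.add m il.1 else m) m ↔
      x ∈ m ∨ ∃ il ∈ lows, il.1 = x ∧ PySem.Str.isIn p il.2 = true := by
  induction lows generalizing m with
  | nil => simp
  | cons il rest ih =>
    simp only [List.foldl_cons]
    by_cases h : PySem.Str.isIn p il.2 = true
    · rw [if_pos h, ih]
      simp only [PySem.Set.mem_add, List.mem_cons]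
      constructor
      · rintro ((hm | rfl) | ⟨jl, hjl, hx, hp⟩)
        · exact Or.inl hm
        · exact Or.inr ⟨il, Or.inl rfl, rfl, h⟩
        · exact Or.inr ⟨jl, Or.inr hjl, hx, hp⟩
      · rintro (hm | ⟨jl, (rfl | hjl), hx, hp⟩)
        · exact Or.inl (Or.inl hm)
        · exact Or.inl (Or.inr hx.symm)
        · exact Or.inr ⟨jl, hjl, hx, hp⟩
    · rw [if_neg h, ih]
      simp only [List.mem_cons]
      constructor
      · rintro (hm | ⟨jl, hjl, hx, hp⟩)
        · exact Or.inl hm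
        · exact Or.inr ⟨jl, Or.inr hjl, hx, hp⟩
      · rintro (hm | ⟨jl, (rfl | hjl), hx, hp⟩)
        · exact Or.inl hm
        · exact absurd hp h
        · exact Or.inr ⟨jl, hjl, hx, hp⟩

-- membership after all marking passes
theorem pv_mem_marked (patterns : List String) (lows : List (Int × String)) (m : PySem.Set Int) (x : Int) :
    x ∈ patterns.foldl (fun m p => pvMarkPass lows p m) m ↔
      x ∈ m ∨ ∃ p ∈ patterns, ∃ il ∈ lows, il.1 = x ∧ PySem.Str.isIn p il.2 = true := by
  simp only [pvMarkPass]
  induction patterns generalizing m with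
  | nil => simp
  | cons p rest ih =>
    simp only [List.foldl_cons, ih, pv_mem_markPass, List.mem_cons]
    constructor
    · rintro ((hm | hp) | ⟨q, hq, h⟩)
      · exact Or.inl hm
      · exact Or.inr ⟨p, Or.inl rfl, hp⟩
      · exact Or.inr ⟨q, Or.inr hq, h⟩
    · rintro (hm | ⟨q, (rfl | hq), h⟩)
      · exact Or.inl (Or.inl hm)
      · exact Or.inl (Or.inr h)
      · exact Or.inr ⟨q, hq, h⟩

-- a list whose first components are strictly increasing has fst-determined members
theorem pv_fst_inj {l : List (Int × String)} (h : l.Pairwise (fun a b => a.1 < b.1))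
    {a b : Int × String} (ha : a ∈ l) (hb : b ∈ l) (hab : a.1 = b.1) : a = b := by
  induction l with
  | nil => cases ha
  | cons x rest ih =>
    rcases List.pairwise_cons.mp h with ⟨hx, hrest⟩
    rcases List.mem_cons.mp ha with rfl | ha'
    · rcases List.mem_cons.mp hb with rfl | hb'
      · rfl
      · exact absurd hab (ne_of_lt (hx b hb'))
    · rcases List.mem_cons.mp hb with rfl | hb'
      · exact absurd hab.symm (ne_of_lt (hx a ha'))
      · exact ih hrest ha' hb'

-- dropping the indices of a filtered enumeration whose test reads only the line
theorem pv_map_snd_filter_enumerate (xs : List String) (P : String → Bool) (s : Int) :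
    (((PySem.List.enumerate xs s).filter (fun il => P il.2)).map (fun il => il.2)) = xs.filter P := by
  induction xs generalizing s with
  | nil => simp [PySem.List.enumerate_nil]
  | cons x rest ih =>
    rw [PySem.List.enumerate_cons]
    by_cases h : P x
    · simp only [List.filter_cons, h]
      simp only [if_pos trivial, List.map_cons]
      rw [ih]
    · simp [h, ih]

-- ===== VERDICT (by name: the statement is the Claim_ definition above) =====
theorem find_likely_sections_spec : Claim_equal_find_likely_sections := by
  intro text keywords _
  simp only [Spec_find_likely_sections, find_likely_sections, find_likely_sections_alt]
  rw [PySem.List.foldl_append_ite_eq_filter, List.nil_append]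
  set patterns := (pvSectionPatterns ++ keywords).map PySem.Str.lower with hpat
  set lines := (PySem.Str.splitlines text).filterMap
    (fun line => if PySem.Str.strip line ≠ "" then some (PySem.Str.strip line) else none) with hlines
  set cand := (PySem.List.enumerate lines).filter (fun il => PySem.Str.len il.2 ≤ 180) with hcand
  have hpw : cand.Pairwise (fun a b => a.1 < b.1) :=
    List.Pairwise.filter _ (PySem.List.pairwise_lt_enumerate lines 0)
  -- rewrite B's membership filter into a per-line any-pattern test
  have hcongr : cand.filter
      (fun il => PySem.Set.contains
        (patterns.foldl (fun m p => pvMarkPass (cand.map (fun jl => (jl.1, PySem.Str.lower jl.2))) p m)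
          PySem.Set.empty) il.1)
      = cand.filter (fun il => patterns.any (fun p => PySem.Str.isIn p (PySem.Str.lower il.2))) := by
    apply List.filter_congr
    intro il hil
    by_cases hb : (patterns.any (fun p => PySem.Str.isIn p (PySem.Str.lower il.2))) = true
    · rw [hb]
      apply (PySem.Set.contains_iff _ _).mpr
      rw [pv_mem_marked]
      rcases List.any_eq_true.mp hb with ⟨p, hp, hin⟩
      exact Or.inr ⟨p, hp, (il.1, PySem.Str.lower il.2), List.mem_map.mpr ⟨il, hil, rfl⟩, rfl, hin⟩
    · have hfalse : PySem.Set.contains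
          (patterns.foldl (fun m p => pvMarkPass (cand.map (fun jl => (jl.1, PySem.Str.lower jl.2))) p m)
            PySem.Set.empty) il.1 = false := by
        apply Bool.eq_false_iff.mpr
        intro hc
        have hmem := (PySem.Set.contains_iff _ _).mp hc
        rw [pv_mem_marked] at hmem
        rcases hmem with hm | ⟨p, hp, jl, hjl, hx, hin⟩
        · simp [PySem.Set.empty] at hm
        · rcases List.mem_map.mp hjl with ⟨kl, hkl, rfl⟩
          have hk : kl = il := pv_fst_inj hpw hkl hil hx
          rw [hk] at hin
          exact hb (List.any_eq_true.mpr ⟨p, hp, hin⟩)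
      rw [hfalse, Bool.eq_false_iff.mpr hb]
  rw [hcongr, hcand, List.filter_filter,
      pv_map_snd_filter_enumerate lines
        (fun x => (patterns.any (fun p => PySem.Str.isIn p (PySem.Str.lower x))) && decide (PySem.Str.len x ≤ 180)) 0]
  congr 1
  apply List.filter_congr
  intro line _
  rw [Bool.eq_iff_iff]
  simp [List.any_eq_true, Bool.and_comm]
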